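-- pv_equiv track=rewrite | github.com/PenguinInPyjamas/advent-of-code-2022 | 15/15.py | get_unavailable_ranges
-- ===== SOURCE A (Python) =====
-- def get_unavailable_ranges(sensor_readings, row_y):
--     unavailable_ranges = []
--     for (sx, sy), (bx, by) in sensor_readings:
--         sensor_to_beacon_distance = abs(sx - bx) + abs(sy - by)
--         row_to_sensor_distance = abs(sy - row_y)
--         range_start = sx - sensor_to_beacon_distance + row_to_sensor_distance
--         range_end = sx + sensor_to_beacon_distance - row_to_sensor_distance
--         if range_start <= range_end:
--             unavailable_ranges.append((range_start, range_end))
--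
--     unavailable_ranges.sort()
--     optimised_available_ranges = []
--     combined_start, combined_end = unavailable_ranges[0]
--     for start, end in unavailable_ranges[1:]:
--         if combined_end < start:
--             optimised_available_ranges.append((combined_start, combined_end))
--             combined_start = start
--             combined_end = end
--         elif combined_end < end:
--             combined_end = end
--     optimised_available_ranges.append((combined_start, combined_end))
--     return optimised_available_ranges
-- ===== SOURCE B (Python) =====
-- def _coverage(reading, row_y):
--     # Half-width of the sensor's coverage on row_y; None if the row is out of reach.
--     (sx, sy), (bx, by) = reading
--     half = abs(sx - bx) + abs(sy - by) - abs(sy - row_y)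
--     return None if half < 0 else (sx - half, sx + half)
--
-- def _sweep_step(state, ev):
--     depth, open_x, merged = state
--     x, kind = ev
--     if kind == 0:
--         return (depth + 1, x if depth == 0 else open_x, merged)
--     return (depth - 1, open_x, merged + [(open_x, x)] if depth - 1 == 0 else merged)
--
-- def get_unavailable_ranges(sensor_readings, row_y):
--     # Event sweep: sorted open(0)/close(1) events folded through a depth counter.
--     spans = [c for c in map(lambda r: _coverage(r, row_y), sensor_readings) if c is not None]
--     events = sorted([(s, 0) for s, _ in spans] + [(e, 1) for _, e in spans])
--     state = (0, 0, [])
--     for ev in events: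
--         state = _sweep_step(state, ev)
--     return state[2]
-- ===== Notes on version B (the rewrite author's own statement) =====
-- stated objective: alternative
-- what changed: Replaces A's sort-intervals-then-fold-a-running-(start,end) merge with an event sweep: spans are computed via an optional half-width helper (filter-map, no running append), turned into separate open/close event lists, sorted, and folded through a (depth, open_x, merged) state that emits a merged interval each time the depth returns to 0.
import Mathlib
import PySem

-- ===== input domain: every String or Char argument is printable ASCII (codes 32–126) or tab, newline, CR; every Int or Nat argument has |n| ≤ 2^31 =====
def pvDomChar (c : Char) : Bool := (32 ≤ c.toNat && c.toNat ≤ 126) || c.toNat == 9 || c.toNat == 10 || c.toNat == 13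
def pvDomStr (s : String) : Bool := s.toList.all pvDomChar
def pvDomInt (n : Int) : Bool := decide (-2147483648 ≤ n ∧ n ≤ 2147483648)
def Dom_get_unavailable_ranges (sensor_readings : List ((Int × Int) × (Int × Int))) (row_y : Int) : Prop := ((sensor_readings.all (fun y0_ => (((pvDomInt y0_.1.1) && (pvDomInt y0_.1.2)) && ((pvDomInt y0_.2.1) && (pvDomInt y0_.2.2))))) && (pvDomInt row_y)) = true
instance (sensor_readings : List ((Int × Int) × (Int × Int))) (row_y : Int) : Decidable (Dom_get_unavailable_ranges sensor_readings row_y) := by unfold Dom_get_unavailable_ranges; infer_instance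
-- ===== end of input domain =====

-- B replaces A's sort-then-fold interval merge by a sorted open/close event sweep folded
-- through a depth counter (objective: alternative); where A raises IndexError (no
-- candidate interval; excluded by Pre_), B returns [].

-- ===== PORT A =====
-- the 'for start, end in unavailable_ranges[1:]' loop, with state (combined_start, combined_end, acc)
def mergeLoopA : List (Int × Int) → Int → Int → List (Int × Int) → List (Int × Int)
  | [], cs, ce, acc => acc ++ [(cs, ce)]
  | (s, e) :: t, cs, ce, acc =>
    if ce < s then mergeLoopA t s e (acc ++ [(cs, ce)])
    else if ce < e then mergeLoopA t cs e acc
    else mergeLoopA t cs ce acc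

def get_unavailable_ranges (sensor_readings : List ((Int × Int) × (Int × Int))) (row_y : Int) : List (Int × Int) :=
  let unavailable_ranges := sensor_readings.foldl (fun acc r =>
    let sx := r.1.1
    let sy := r.1.2
    let bx := r.2.1
    let b_y := r.2.2
    let sensor_to_beacon_distance := |sx - bx| + |sy - b_y|
    let row_to_sensor_distance := |sy - row_y|
    let range_start := sx - sensor_to_beacon_distance + row_to_sensor_distance
    let range_end := sx + sensor_to_beacon_distance - row_to_sensor_distance
    if range_start ≤ range_end then acc ++ [(range_start, range_end)] else acc) []
  let unavailable_ranges := PySem.List.sorted2 unavailable_ranges (fun p => p.1) (fun p => p.2)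
  match PySem.List.pyGet? unavailable_ranges 0 with
  | none => []  -- Python raises IndexError at unavailable_ranges[0]; excluded by Pre_
  | some (combined_start, combined_end) =>
      mergeLoopA (PySem.List.slice unavailable_ranges (some 1) none) combined_start combined_end []

-- ===== PORT B =====
-- _coverage: optional (start, end) span of one reading on row_y, via its half-width
def coverageB (row_y : Int) (r : (Int × Int) × (Int × Int)) : Option (Int × Int) :=
  let half := |r.1.1 - r.2.1| + |r.1.2 - r.2.2| - |r.1.2 - row_y|
  if half < 0 then none else some (r.1.1 - half, r.1.1 + half)

-- _sweep_step: one event applied to the state (depth, open_x, merged)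
def sweepStep (state : Int × Int × List (Int × Int)) (ev : Int × Int) : Int × Int × List (Int × Int) :=
  if ev.2 == 0 then
    (state.1 + 1, if state.1 == 0 then ev.1 else state.2.1, state.2.2)
  else
    (state.1 - 1, state.2.1, if state.1 - 1 == 0 then state.2.2 ++ [(state.2.1, ev.1)] else state.2.2)

def get_unavailable_ranges_alt (sensor_readings : List ((Int × Int) × (Int × Int))) (row_y : Int) : List (Int × Int) :=
  let spans := sensor_readings.filterMap (coverageB row_y)
  let events := PySem.List.sorted2
    (spans.map (fun p => (p.1, (0 : Int))) ++ spans.map (fun p => (p.2, (1 : Int))))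
    (fun p => p.1) (fun p => p.2)
  (events.foldl sweepStep (0, 0, [])).2.2

-- ===== PRECONDITION & SPEC =====
-- Pre_ excludes exactly the inputs where no reading covers row_y (no candidate
-- interval), on which A raises IndexError at unavailable_ranges[0].
def Pre_get_unavailable_ranges (sensor_readings : List ((Int × Int) × (Int × Int))) (row_y : Int) : Prop :=
  ∃ r ∈ sensor_readings, |r.1.2 - row_y| ≤ |r.1.1 - r.2.1| + |r.1.2 - r.2.2|
instance (sensor_readings : List ((Int × Int) × (Int × Int))) (row_y : Int) : Decidable (Pre_get_unavailable_ranges sensor_readings row_y) := by unfold Pre_get_unavailable_ranges; infer_instance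

def pvWitness_get_unavailable_ranges : (List ((Int × Int) × (Int × Int))) × Int := ([((0, 0), (2, 0))], 0)

def Spec_get_unavailable_ranges (sensor_readings : List ((Int × Int) × (Int × Int))) (row_y : Int) (out : List (Int × Int)) : Prop := out = get_unavailable_ranges_alt sensor_readings row_y
instance (sensor_readings : List ((Int × Int) × (Int × Int))) (row_y : Int) (out : List (Int × Int)) : Decidable (Spec_get_unavailable_ranges sensor_readings row_y out) := by unfold Spec_get_unavailable_ranges; infer_instance

-- ===== CLAIM (what is proved, stated in full; the proofs are below) =====
def Claim_equal_get_unavailable_ranges : Prop := ∀ (sensor_readings : List ((Int × Int) × (Int × Int))) (row_y : Int), Dom_get_unavailable_ranges sensor_readings row_y → Pre_get_unavailable_ranges sensor_readings row_y → Spec_get_unavailable_ranges sensor_readings row_y (get_unavailable_ranges sensor_readings row_y)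


-- ===== LEMMAS AND PROOFS =====

-- recursive form of B's sweep fold, used only inside the proofs
def sweepLoop : List (Int × Int) → Int → Int → List (Int × Int) → List (Int × Int)
  | [], _, _, merged => merged
  | (x, kind) :: t, depth, open_x, merged =>
    if kind == 0 then
      sweepLoop t (depth + 1) (if depth == 0 then x else open_x) merged
    else
      sweepLoop t (depth - 1) open_x
        (if depth - 1 == 0 then merged ++ [(open_x, x)] else merged)

lemma foldl_sweepStep (E : List (Int × Int)) : ∀ (d o : Int) (m : List (Int × Int)),
    (E.foldl sweepStep (d, o, m)).2.2 = sweepLoop E d o m := by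
  induction E with
  | nil => intro d o m; simp [sweepLoop]
  | cons ev t ih =>
    intro d o m
    obtain ⟨x, k⟩ := ev
    by_cases hk : k == 0
    · simp only [List.foldl_cons, sweepStep, hk, if_true, sweepLoop]
      exact ih _ _ _
    · simp only [List.foldl_cons, sweepStep, hk, if_false, sweepLoop]
      rw [if_neg (by simpa using hk)]
      exact ih _ _ _

-- lexicographic ≤ on pairs of ints (Python tuple order); also read as "interval order"
def evLe (a b : Int × Int) : Prop := a.1 < b.1 ∨ (a.1 = b.1 ∧ a.2 ≤ b.2)

-- the boolean strict comparison sorted2 uses with keys (·.1), (·.2)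
def ltB (a b : Int × Int) : Bool :=
  decide (a.1 < b.1) || (!decide (b.1 < a.1) && decide (a.2 < b.2))

lemma evLe_refl (a : Int × Int) : evLe a a := by simp [evLe]

lemma evLe_trans {a b c : Int × Int} (h1 : evLe a b) (h2 : evLe b c) : evLe a c := by
  rcases h1 with h | ⟨h, h'⟩ <;> rcases h2 with g | ⟨g, g'⟩ <;> simp [evLe] <;> omega

lemma ltB_true {a b : Int × Int} (h : ltB a b = true) : evLe a b := by
  simp [ltB] at h; rcases h with h | h <;> simp [evLe] <;> omega

lemma ltB_false {a b : Int × Int} (h : ltB a b = false) : evLe b a := by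
  simp [ltB] at h; simp [evLe]; omega

lemma insertBy_pairwise (x : Int × Int) (acc : List (Int × Int))
    (h : acc.Pairwise evLe) : (PySem.List.insertBy ltB x acc).Pairwise evLe := by
  induction acc with
  | nil => simp [PySem.List.insertBy]
  | cons y ys ih =>
    rw [List.pairwise_cons] at h
    obtain ⟨hy, hys⟩ := h
    by_cases hlt : ltB x y = true
    · simp only [PySem.List.insertBy, hlt, if_true]
      rw [List.pairwise_cons]
      refine ⟨?_, List.Pairwise.cons hy hys⟩
      intro z hz
      rcases List.mem_cons.1 hz with rfl | hz
      · exact ltB_true hlt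
      · exact evLe_trans (ltB_true hlt) (hy z hz)
    · have hlt' : ltB x y = false := by revert hlt; cases ltB x y <;> simp
      rw [show PySem.List.insertBy ltB x (y :: ys) = y :: PySem.List.insertBy ltB x ys by
        simp [PySem.List.insertBy, hlt']]
      rw [List.pairwise_cons]
      refine ⟨?_, ih hys⟩
      intro z hz
      rcases (PySem.List.mem_insertBy ltB x z ys).1 hz with hzx | hz
      · rw [hzx]
        exact ltB_false hlt'
      · exact hy z hz

lemma foldl_insertBy_pairwise (xs acc : List (Int × Int)) (h : acc.Pairwise evLe) :
    (xs.foldl (fun acc x => PySem.List.insertBy ltB x acc) acc).Pairwise evLe := by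
  induction xs generalizing acc with
  | nil => exact h
  | cons x xs ih => exact ih _ (insertBy_pairwise x acc h)

lemma sorted2_pairwise (xs : List (Int × Int)) :
    (PySem.List.sorted2 xs (fun p => p.1) (fun p => p.2) false).Pairwise evLe := by
  have : PySem.List.sorted2 xs (fun p => p.1) (fun p => p.2) false
      = xs.foldl (fun acc x => PySem.List.insertBy ltB x acc) [] := by
    simp only [PySem.List.sorted2]
    rfl
  rw [this]
  exact foldl_insertBy_pairwise xs [] (by simp)

-- events of a candidate interval list / closes of a pending multiset
def eventsOf (t : List (Int × Int)) : List (Int × Int) :=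
  t.flatMap (fun p => [(p.1, (0 : Int)), (p.2, (1 : Int))])

def closesOf (C : List Int) : List (Int × Int) := C.map (fun c => (c, (1 : Int)))

-- running maximum of a nonempty list (A's combined_end)
def maxOf : List Int → Int
  | [] => 0
  | c :: cs => cs.foldl max c

-- the merge state A is in, given remaining intervals t, open point o and pending closes C
def mergeState (t : List (Int × Int)) (o : Int) (C : List Int) (acc : List (Int × Int)) : List (Int × Int) :=
  match C with
  | [] => match t with
          | [] => acc
          | (s, e) :: t' => mergeLoopA t' s e acc
  | _ :: _ => mergeLoopA t o (maxOf C) acc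

lemma mem_le_maxOf {c : Int} {C : List Int} (h : c ∈ C) : c ≤ maxOf C := by
  cases C with
  | nil => cases h
  | cons d ds =>
    rcases List.mem_cons.1 h with rfl | h
    · exact (PySem.List.le_foldl_max ds c).1
    · exact (PySem.List.le_foldl_max ds d).2 c h

lemma maxOf_append_singleton (c : Int) (cs : List Int) (e : Int) :
    maxOf ((c :: cs) ++ [e]) = max (maxOf (c :: cs)) e := by
  simp [maxOf, List.foldl_append]

lemma foldl_max_erase (cs : List Int) (x a : Int) (hmem : x ∈ cs) (hle : x ≤ a) :
    (cs.erase x).foldl max a = cs.foldl max a := by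
  induction cs generalizing a with
  | nil => cases hmem
  | cons c t ih =>
    by_cases hc : c = x
    · subst hc
      rw [List.erase_cons_head]
      simp [List.foldl_cons, max_eq_left hle]
    · rw [List.erase_cons_tail (by simp [hc])]
      have hmemt : x ∈ t := by
        rcases List.mem_cons.1 hmem with h | h
        · exact absurd h.symm hc
        · exact h
      rw [List.foldl_cons, List.foldl_cons]
      exact ih _ hmemt (le_trans hle (le_max_left a c))

lemma maxOf_erase {C : List Int} {x : Int} (hmem : x ∈ C)
    (hne : C.erase x ≠ []) (hmin : ∀ c ∈ C, x ≤ c) :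
    maxOf (C.erase x) = maxOf C := by
  cases C with
  | nil => cases hmem
  | cons c cs =>
    by_cases hc : c = x
    · subst hc
      rw [List.erase_cons_head] at hne ⊢
      cases cs with
      | nil => exact absurd rfl hne
      | cons d ds =>
        simp only [maxOf, List.foldl_cons]
        have hxd : c ≤ d := hmin d (by simp)
        rw [max_eq_right hxd]
    · rw [List.erase_cons_tail (by simp [hc])]
      have hmemcs : x ∈ cs := by
        rcases List.mem_cons.1 hmem with h | h
        · exact absurd h.symm hc
        · exact h
      simp only [maxOf]
      exact foldl_max_erase cs x c hmemcs (hmin c (by simp))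

-- events of a candidate interval list
lemma mem_eventsOf {z : Int × Int} {t : List (Int × Int)} :
    z ∈ eventsOf t ↔ ∃ p ∈ t, z = (p.1, 0) ∨ z = (p.2, 1) := by
  simp only [eventsOf, List.mem_flatMap, List.mem_cons, List.not_mem_nil, or_false]

-- ===== the key sweep/merge correspondence =====
lemma mergeState_ne_nil (t : List (Int × Int)) (o : Int) (C : List Int) (acc : List (Int × Int))
    (h : C ≠ []) : mergeState t o C acc = mergeLoopA t o (maxOf C) acc := by
  cases C with
  | nil => exact absurd rfl h
  | cons c cs => rfl

lemma closes_split {C : List Int} {x : Int} (hx : x ∈ C) (t : List (Int × Int)) :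
    (closesOf C ++ eventsOf t).Perm ((x, 1) :: (closesOf (C.erase x) ++ eventsOf t)) := by
  have h1 : C.Perm (x :: C.erase x) := List.perm_cons_erase hx
  have h2 : (closesOf C).Perm ((x, (1 : Int)) :: closesOf (C.erase x)) := by
    simpa [closesOf] using h1.map (fun c => (c, (1 : Int)))
  exact (h2.append_right (eventsOf t)).trans (by rfl)

lemma sweep_key (E : List (Int × Int)) : ∀ (t : List (Int × Int)) (C : List Int) (o : Int) (acc : List (Int × Int)),
    E.Perm (closesOf C ++ eventsOf t) →
    E.Pairwise evLe →
    t.Pairwise evLe →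
    (∀ p ∈ t, p.1 ≤ p.2) →
    sweepLoop E (C.length : Int) o acc = mergeState t o C acc := by
  induction E with
  | nil =>
    intro t C o acc hperm _ _ _
    have h0 : closesOf C ++ eventsOf t = [] := hperm.symm.eq_nil
    obtain ⟨hC, ht⟩ := List.append_eq_nil_iff.1 h0
    have hC0 : C = [] := by simpa [closesOf] using hC
    have ht0 : t = [] := by
      cases t with
      | nil => rfl
      | cons p t' => simp [eventsOf] at ht
    subst hC0; subst ht0
    simp [sweepLoop, mergeState]
  | cons hd E' ih =>
    intro t C o acc hperm hpw tpw hbnd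
    obtain ⟨x, k⟩ := hd
    rw [List.pairwise_cons] at hpw
    obtain ⟨hmin, hpwE'⟩ := hpw
    have hmem : (x, k) ∈ closesOf C ++ eventsOf t := hperm.subset (by simp)
    have hminAll : ∀ y ∈ closesOf C ++ eventsOf t, evLe (x, k) y := by
      intro y hy
      have hy' : y ∈ (x, k) :: E' := hperm.symm.subset hy
      rcases List.mem_cons.1 hy' with rfl | h
      · exact evLe_refl _
      · exact hmin y h
    have hk : k = 0 ∨ k = 1 := by
      rcases List.mem_append.1 hmem with h | h
      · right
        simp [closesOf] at h
        omega
      · rcases mem_eventsOf.1 h with ⟨p, _, h | h⟩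
        · left; exact congrArg Prod.snd h
        · right; exact congrArg Prod.snd h
    rcases hk with rfl | rfl
    · -- k = 0 : an OPEN event; it belongs to the first remaining interval
      have hxC : (x, (0 : Int)) ∉ closesOf C := by simp [closesOf]
      have hmemev : (x, (0 : Int)) ∈ eventsOf t := (List.mem_append.1 hmem).resolve_left hxC
      obtain ⟨p, hp, hcase⟩ := mem_eventsOf.1 hmemev
      have hxp : x = p.1 := by
        rcases hcase with h | h
        · exact congrArg Prod.fst h
        · exact absurd (congrArg Prod.snd h) (by simp)
      cases t with
      | nil => simp at hp
      | cons q t' =>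
        obtain ⟨s, e⟩ := q
        rw [List.pairwise_cons] at tpw
        obtain ⟨tq, tpw'⟩ := tpw
        have hs0 : (s, (0 : Int)) ∈ closesOf C ++ eventsOf ((s, e) :: t') := by
          refine List.mem_append_right _ (mem_eventsOf.2 ⟨(s, e), by simp, by simp⟩)
        have hxs : x = s := by
          have h1 : evLe (x, 0) (s, 0) := hminAll _ hs0
          have h2 : s ≤ x := by
            rcases List.mem_cons.1 hp with rfl | hp'
            · omega
            · have := tq p hp'
              rcases this with h | ⟨h, _⟩ <;> omega
          rcases h1 with h | ⟨h, _⟩ <;> omega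
        subst hxs
        -- remove the open, push e onto the pending closes
        have hperm' : E'.Perm (closesOf (C ++ [e]) ++ eventsOf t') := by
          have hsplit : (closesOf C ++ eventsOf ((x, e) :: t')).Perm
              ((x, (0 : Int)) :: (closesOf (C ++ [e]) ++ eventsOf t')) := by
            have he : closesOf C ++ eventsOf ((x, e) :: t')
                = closesOf C ++ ((x, (0 : Int)) :: ((e, (1 : Int)) :: eventsOf t')) := by
              simp [eventsOf, closesOf]
            rw [he]
            refine List.Perm.trans List.perm_middle ?_
            refine List.Perm.cons _ ?_
            have h2 : closesOf C ++ ((e, (1 : Int)) :: eventsOf t')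
                = closesOf (C ++ [e]) ++ eventsOf t' := by
              simp [closesOf]
            rw [h2]
          exact (hperm.trans hsplit).cons_inv
        have hbnd' : ∀ p ∈ t', p.1 ≤ p.2 := fun p hp' => hbnd p (List.mem_cons_of_mem _ hp')
        cases C with
        | nil =>
          have hstep : sweepLoop ((x, (0 : Int)) :: E') (([] : List Int).length : Int) o acc
              = sweepLoop E' 1 x acc := by
            simp [sweepLoop]
          rw [hstep]
          have := ih t' [e] x acc (by simpa using hperm') hpwE' tpw' hbnd'
          simp only [List.length_cons, List.length_nil] at this
          rw [show (((1 : Nat) : Int)) = 1 by rfl] at this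
          rw [this]
          simp [mergeState, maxOf]
        | cons c cs =>
          have hlen : (((c :: cs).length : Int)) ≠ 0 := by
            simp only [List.length_cons]
            push_cast
            omega
          have hstep : sweepLoop ((x, (0 : Int)) :: E') (((c :: cs).length : Int)) o acc
              = sweepLoop E' (((c :: cs).length : Int) + 1) o acc := by
            simp [sweepLoop]
            rw [if_neg (by omega)]
          rw [hstep]
          have hlen2 : (((c :: cs).length : Int) + 1) = ((((c :: cs) ++ [e]).length : Int)) := by
            simp only [List.length_cons, List.length_append, List.length_nil]
            push_cast
            omega
          rw [hlen2]
          rw [ih t' ((c :: cs) ++ [e]) o acc hperm' hpwE' tpw' hbnd']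
          -- now compare the two merge states
          have hsM : x ≤ maxOf (c :: cs) := by
            have h1 : evLe (x, 0) (c, 1) := hminAll _ (List.mem_append_left _ (by simp [closesOf]))
            have h2 : c ≤ maxOf (c :: cs) := mem_le_maxOf (by simp)
            rcases h1 with h | ⟨h, _⟩ <;> omega
          rw [mergeState_ne_nil _ _ _ _ (by simp), mergeState_ne_nil _ _ _ _ (by simp)]
          rw [maxOf_append_singleton]
          simp only [mergeLoopA]
          rw [if_neg (by omega)]
          by_cases he : maxOf (c :: cs) < e
          · rw [if_pos he, max_eq_right (le_of_lt he)]
          · rw [if_neg he, max_eq_left (by omega)]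
    · -- k = 1 : a CLOSE event; it comes from the pending multiset C
      have hxC : x ∈ C := by
        by_contra hxc
        have hmemev : (x, (1 : Int)) ∈ eventsOf t := by
          rcases List.mem_append.1 hmem with h | h
          · exact absurd (by simpa [closesOf] using h) hxc
          · exact h
        obtain ⟨p, hp, hcase⟩ := mem_eventsOf.1 hmemev
        have hxp : x = p.2 := by
          rcases hcase with h | h
          · exact absurd (congrArg Prod.snd h) (by simp)
          · exact congrArg Prod.fst h
        have hopen : (p.1, (0 : Int)) ∈ closesOf C ++ eventsOf t :=
          List.mem_append_right _ (mem_eventsOf.2 ⟨p, hp, Or.inl rfl⟩)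
        have h1 : evLe (x, 1) (p.1, 0) := hminAll _ hopen
        have h2 : p.1 ≤ p.2 := hbnd p hp
        rcases h1 with h | ⟨h, h'⟩ <;> omega
      have hminC : ∀ c ∈ C, x ≤ c := by
        intro c hc
        have := hminAll (c, 1) (List.mem_append_left _ (by simp [closesOf, hc]))
        rcases this with h | ⟨h, _⟩ <;> omega
      have hCpos : 0 < C.length := List.length_pos_of_mem hxC
      have hperm' : E'.Perm (closesOf (C.erase x) ++ eventsOf t) :=
        (hperm.trans (closes_split hxC t)).cons_inv
      have hlenE : ((C.erase x).length : Int) = (C.length : Int) - 1 := by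
        have := List.length_erase_of_mem hxC
        omega
      by_cases hC1 : C.length = 1
      · -- depth returns to 0 : emit the merged interval
        have hCx : C = [x] := by
          obtain ⟨c, rfl⟩ := List.length_eq_one_iff.1 hC1
          rcases List.mem_singleton.1 hxC with rfl
          rfl
        subst hCx
        have hstep : sweepLoop ((x, (1 : Int)) :: E') (([x].length : Int)) o acc
            = sweepLoop E' 0 (o) (acc ++ [(o, x)]) := by
          simp [sweepLoop]
        rw [hstep]
        have herase : ([x].erase x) = [] := by simp
        rw [herase] at hperm'
        have := ih t [] o (acc ++ [(o, x)]) (by simpa using hperm') hpwE' tpw hbnd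
        simp only [List.length_nil, Int.natCast_zero] at this
        rw [this]
        cases t with
        | nil => simp [mergeState, mergeLoopA, maxOf]
        | cons q t' =>
          obtain ⟨s, e⟩ := q
          have hxs : x < s := by
            have h1 : evLe (x, 1) (s, 0) := hminAll _
              (List.mem_append_right _ (mem_eventsOf.2 ⟨(s, e), by simp, by simp⟩))
            rcases h1 with h | ⟨h, h'⟩ <;> omega
          simp only [mergeState, mergeLoopA, maxOf, List.foldl_nil]
          rw [if_pos hxs]
      · -- depth stays positive : just decrement
        have hC2 : 2 ≤ C.length := by omega
        have hne : C.erase x ≠ [] := by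
          have := List.length_erase_of_mem hxC
          intro h
          rw [h] at this
          simp at this
          omega
        have hd0 : ((C.length : Int) - 1) ≠ 0 := by omega
        have hstep : sweepLoop ((x, (1 : Int)) :: E') ((C.length : Int)) o acc
            = sweepLoop E' ((C.length : Int) - 1) o acc := by
          simp [sweepLoop, hd0]
        rw [hstep]
        rw [← hlenE]
        rw [ih t (C.erase x) o acc hperm' hpwE' tpw hbnd]
        rw [mergeState_ne_nil _ _ _ _ hne, mergeState_ne_nil _ _ _ _ (by intro h; rw [h] at hCpos; simp at hCpos)]
        rw [maxOf_erase hxC hne hminC]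

-- ===== top-level assembly =====

abbrev condP (row_y : Int) (r : (Int × Int) × (Int × Int)) : Prop :=
  r.1.1 - (|r.1.1 - r.2.1| + |r.1.2 - r.2.2|) + |r.1.2 - row_y|
    ≤ r.1.1 + (|r.1.1 - r.2.1| + |r.1.2 - r.2.2|) - |r.1.2 - row_y|

def intervalOf (row_y : Int) (r : (Int × Int) × (Int × Int)) : Int × Int :=
  (r.1.1 - (|r.1.1 - r.2.1| + |r.1.2 - r.2.2|) + |r.1.2 - row_y|,
   r.1.1 + (|r.1.1 - r.2.1| + |r.1.2 - r.2.2|) - |r.1.2 - row_y|)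

def cand (sensor_readings : List ((Int × Int) × (Int × Int))) (row_y : Int) : List (Int × Int) :=
  (sensor_readings.filter (fun r => decide (condP row_y r))).map (intervalOf row_y)

lemma foldA_eq (sensor_readings : List ((Int × Int) × (Int × Int))) (row_y : Int) :
    sensor_readings.foldl (fun acc r =>
      let sx := r.1.1
      let sy := r.1.2
      let bx := r.2.1
      let b_y := r.2.2
      let sensor_to_beacon_distance := |sx - bx| + |sy - b_y|
      let row_to_sensor_distance := |sy - row_y|
      let range_start := sx - sensor_to_beacon_distance + row_to_sensor_distance
      let range_end := sx + sensor_to_beacon_distance - row_to_sensor_distance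
      if range_start ≤ range_end then acc ++ [(range_start, range_end)] else acc) []
      = cand sensor_readings row_y := by
  simpa [cand] using PySem.List.foldl_append_ite (l := sensor_readings)
    (acc := ([] : List (Int × Int))) (p := condP row_y) (f := intervalOf row_y)

-- B's span computation produces exactly A's candidate intervals
lemma coverageB_eq (row_y : Int) (r : (Int × Int) × (Int × Int)) :
    coverageB row_y r = if condP row_y r then some (intervalOf row_y r) else none := by
  simp only [coverageB, condP, intervalOf]
  generalize |r.1.1 - r.2.1| + |r.1.2 - r.2.2| = d
  generalize |r.1.2 - row_y| = rd
  by_cases h : d - rd < 0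
  · rw [if_pos h, if_neg (by omega)]
  · rw [if_neg h, if_pos (by omega)]
    have h1 : r.1.1 - (d - rd) = r.1.1 - d + rd := by omega
    have h2 : r.1.1 + (d - rd) = r.1.1 + d - rd := by omega
    rw [h1, h2]

lemma spans_eq (sensor_readings : List ((Int × Int) × (Int × Int))) (row_y : Int) :
    sensor_readings.filterMap (coverageB row_y) = cand sensor_readings row_y := by
  induction sensor_readings with
  | nil => simp [cand]
  | cons r t ih =>
    rw [List.filterMap_cons, coverageB_eq]
    by_cases h : condP row_y r
    · simp only [h, if_true]
      rw [ih]
      simp [cand, List.filter_cons, h]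
    · simp only [h, if_false]
      rw [ih]
      simp [cand, List.filter_cons, h]

-- B's open-events-then-close-events list is a permutation of the interleaved events
lemma two_maps_perm_eventsOf (spans : List (Int × Int)) :
    (spans.map (fun p => (p.1, (0 : Int))) ++ spans.map (fun p => (p.2, (1 : Int)))).Perm
      (eventsOf spans) := by
  induction spans with
  | nil => simp [eventsOf]
  | cons q t ih =>
    simp only [List.map_cons, List.cons_append, eventsOf, List.flatMap_cons]
    refine List.Perm.cons _ ?_
    refine List.Perm.trans List.perm_middle ?_
    exact List.Perm.cons _ ih

lemma cond_of_mem_cand {q : Int × Int} {sensor_readings : List ((Int × Int) × (Int × Int))} {row_y : Int}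
    (h : q ∈ cand sensor_readings row_y) : q.1 ≤ q.2 := by
  obtain ⟨r, hr, rfl⟩ := List.mem_map.1 h
  have hc : condP row_y r := by
    have := (List.mem_filter.1 hr).2
    simpa using this
  simpa [intervalOf] using hc

lemma main_eq (sensor_readings : List ((Int × Int) × (Int × Int))) (row_y : Int)
    (hpre : Pre_get_unavailable_ranges sensor_readings row_y) :
    get_unavailable_ranges sensor_readings row_y = get_unavailable_ranges_alt sensor_readings row_y := by
  obtain ⟨r0, hm0, hle0⟩ := hpre
  have hcond0 : condP row_y r0 := by
    unfold condP
    generalize |r0.1.1 - r0.2.1| + |r0.1.2 - r0.2.2| = d at hle0 ⊢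
    generalize |r0.1.2 - row_y| = rd at hle0 ⊢
    omega
  have hcne : cand sensor_readings row_y ≠ [] := by
    intro h
    have hmem : r0 ∈ sensor_readings.filter (fun r => decide (condP row_y r)) :=
      List.mem_filter.2 ⟨hm0, by simp [hcond0]⟩
    rw [cand, List.map_eq_nil_iff] at h
    rw [h] at hmem
    cases hmem
  -- name the sorted candidate list
  set c := cand sensor_readings row_y with hc
  set S := PySem.List.sorted2 c (fun p => p.1) (fun p => p.2) false with hSdef
  have hSperm : S.Perm c := PySem.List.sorted2_perm c (fun p => p.1) (fun p => p.2) false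
  have hSne : S ≠ [] := by
    intro h
    exact hcne (List.Perm.nil_eq (h ▸ hSperm)).symm
  obtain ⟨⟨cs, ce⟩, rest, hS⟩ : ∃ a l, S = a :: l := by
    cases hSv : S with
    | nil => exact absurd hSv hSne
    | cons a l => exact ⟨a, l, rfl⟩
  -- reduce port A
  have hA : get_unavailable_ranges sensor_readings row_y = mergeLoopA rest cs ce [] := by
    simp only [get_unavailable_ranges]
    rw [foldA_eq, ← hc, ← hSdef, hS]
    rw [PySem.List.slice_from _ (by norm_num)]
    simp [PySem.List.pyGet?, PySem.List.pyIdx?]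
  -- reduce port B to the recursive sweep over its sorted event list
  set E := PySem.List.sorted2
    (c.map (fun p => (p.1, (0 : Int))) ++ c.map (fun p => (p.2, (1 : Int))))
    (fun p => p.1) (fun p => p.2) false with hEdef
  have hB : get_unavailable_ranges_alt sensor_readings row_y = sweepLoop E 0 0 [] := by
    simp only [get_unavailable_ranges_alt]
    rw [spans_eq, ← hc, ← hEdef]
    exact foldl_sweepStep E 0 0 []
  rw [hA, hB]
  -- the sweep over the sorted events equals A's fold over the sorted intervals
  have hEperm : E.Perm (eventsOf c) :=
    (PySem.List.sorted2_perm _ _ _ _).trans (two_maps_perm_eventsOf c)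
  have hkey := sweep_key E S [] 0 []
    (by
      simp only [closesOf, List.map_nil, List.nil_append]
      exact hEperm.trans (List.Perm.flatMap_right _ hSperm.symm))
    (hEdef ▸ sorted2_pairwise _)
    (by rw [hSdef]; exact sorted2_pairwise c)
    (by
      intro p hp
      exact cond_of_mem_cand (hSperm.subset hp))
  simp only [List.length_nil, Int.natCast_zero] at hkey
  rw [hkey, hS]
  simp [mergeState]

-- ===== VERDICT (by name: the statement is the Claim_ definition above) =====
theorem get_unavailable_ranges_spec : Claim_equal_get_unavailable_ranges := by
  intro sensor_readings row_y _ hpre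
  unfold Spec_get_unavailable_ranges
  exact main_eq sensor_readings row_y hpre
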